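-- pv_equiv track=rewrite | github.com/Yosuke1980/BillingManager2.0 | order_management/ui/program_master_widget.py | _sort_programs_hierarchically
-- ===== SOURCE A (Python) =====
-- def _sort_programs_hierarchically(programs):
--     """番組を階層順にソート（親番組の直後にその子番組を配置）
--
--     Args:
--         programs: 番組リスト（階層情報付き）
--
--     Returns:
--         階層順にソートされた番組リスト
--     """
--     # 親番組（parent_program_id が None）と子番組を分離
--     parent_programs = []
--     children_by_parent = {}
--
--     for program in programs:
--         parent_program_id = program[9] if len(program) > 9 else None
--
--         if parent_program_id is None:
--             # 親番組
--             parent_programs.append(program)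
--         else:
--             # 子番組（コーナー）
--             if parent_program_id not in children_by_parent:
--                 children_by_parent[parent_program_id] = []
--             children_by_parent[parent_program_id].append(program)
--
--     # 親番組を名前順にソート
--     parent_programs.sort(key=lambda p: p[1] or "")
--
--     # 階層順に結合
--     result = []
--     for parent in parent_programs:
--         parent_id = parent[0]
--         result.append(parent)
--
--         # この親番組の子番組（コーナー）を追加
--         if parent_id in children_by_parent:
--             children = children_by_parent[parent_id]
--             # 子番組も名前順にソート
--             children.sort(key=lambda p: p[1] or "")
--             result.extend(children)
--
--     return result
-- ===== SOURCE B (Python) =====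
-- def _sort_programs_hierarchically(programs):
--     def pid(p):
--         return p[9] if len(p) > 9 else None
--
--     def name_key(p):
--         return p[1] or ""
--
--     parents = sorted((p for p in programs if pid(p) is None), key=name_key)
--     result = []
--     for parent in parents:
--         result.append(parent)
--         result.extend(sorted((c for c in programs
--                               if pid(c) is not None and pid(c) == parent[0]),
--                              key=name_key))
--     return result
-- ===== Notes on version B (the rewrite author's own statement) =====
-- stated objective: simpler
-- what changed: Replaced A's partition-into-dict-buckets plus per-group in-place sorts and interleave with a direct decomposition: sort the parent rows once, then for each parent gather its children by a filtered stable sort over the input; the dict and the separation pass disappear.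
import Mathlib
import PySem

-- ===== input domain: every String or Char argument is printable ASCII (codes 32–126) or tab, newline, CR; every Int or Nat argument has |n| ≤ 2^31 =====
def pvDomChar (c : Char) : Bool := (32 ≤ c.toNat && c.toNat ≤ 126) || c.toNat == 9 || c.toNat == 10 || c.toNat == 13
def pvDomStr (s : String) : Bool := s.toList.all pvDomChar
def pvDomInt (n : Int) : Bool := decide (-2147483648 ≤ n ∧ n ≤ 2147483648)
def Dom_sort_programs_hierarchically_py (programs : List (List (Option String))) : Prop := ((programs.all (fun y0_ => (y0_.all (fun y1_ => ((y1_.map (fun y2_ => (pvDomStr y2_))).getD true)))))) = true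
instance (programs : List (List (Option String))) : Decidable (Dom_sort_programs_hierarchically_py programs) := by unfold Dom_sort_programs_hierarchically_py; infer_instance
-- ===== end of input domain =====

-- B replaces A's partition-into-dict-buckets + per-group sorts + interleave by one sort of the
-- parents and a filtered stable sort per parent for its children (objective: simpler).

-- ===== PORT A =====
-- program[9] if len(program) > 9 else None
def pvPid (p : List (Option String)) : Option String :=
  if 9 < p.length then PySem.List.pyGetD p 9 none else none

-- the sort key  lambda p: p[1] or ""   (total rendering: out of range reads as None; A raises
-- there, and exactly those inputs are excluded by Pre_ below)
def pvKey (p : List (Option String)) : String :=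
  (PySem.List.pyGetD p 1 none).getD ""

def sort_programs_hierarchically_py (programs : List (List (Option String))) : List (List (Option String)) :=
  -- first loop: split into parent_programs and children_by_parent
  let st := programs.foldl
    (fun (st : List (List (Option String)) × PySem.Dict (Option String) (List (List (Option String)))) program =>
      (if pvPid program == none then st.1 ++ [program] else st.1,
       if pvPid program == none then st.2
       else ((if st.2.contains (pvPid program) then st.2 else st.2.insert (pvPid program) []).modify
               (pvPid program) [] (fun l => l ++ [program]))))
    ([], PySem.Dict.empty)
  -- parent_programs.sort(key=lambda p: p[1] or "")
  let parents := PySem.List.sorted st.1 pvKey false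
  -- second loop: result.append(parent); if parent_id in dict: children.sort(); result.extend(children)
  -- (the in-place children.sort() is rendered as sorting the stored group where it is consumed;
  --  re-sorting an already sorted group yields the same list of values)
  parents.foldl
    (fun result parent =>
      let result := result ++ [parent]
      match st.2.get? (PySem.List.pyGetD parent 0 none) with
      | none => result
      | some children => result ++ PySem.List.sorted children pvKey false)
    []

-- ===== PORT B =====
def sort_programs_hierarchically_py_alt (programs : List (List (Option String))) : List (List (Option String)) :=
  let parents := PySem.List.sorted (programs.filter (fun p => pvPid p == none)) pvKey false
  parents.foldl
    (fun result parent =>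
      result ++ [parent]
        ++ PySem.List.sorted
             (programs.filter (fun c => !(pvPid c == none) && (pvPid c == PySem.List.pyGetD parent 0 none)))
             pvKey false)
    []

-- ===== PRECONDITION & SPEC =====
-- Pre_ excludes exactly the inputs where the Python A raises IndexError: a parent row (no
-- parent_program_id) shorter than 2, on which the sort key p[1] is out of range.
def Pre_sort_programs_hierarchically_py (programs : List (List (Option String))) : Prop :=
  ∀ p ∈ programs, pvPid p = none → 2 ≤ p.length
instance (programs : List (List (Option String))) : Decidable (Pre_sort_programs_hierarchically_py programs) := by unfold Pre_sort_programs_hierarchically_py; infer_instance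

def pvWitness_sort_programs_hierarchically_py : List (List (Option String)) :=
  [[some "1", some "b"], [some "2", some "a"],
   [some "3", some "c", none, none, none, none, none, none, none, some "2"]]

def Spec_sort_programs_hierarchically_py (programs : List (List (Option String))) (out : List (List (Option String))) : Prop := out = sort_programs_hierarchically_py_alt programs
instance (programs : List (List (Option String))) (out : List (List (Option String))) : Decidable (Spec_sort_programs_hierarchically_py programs out) := by unfold Spec_sort_programs_hierarchically_py; infer_instance

-- ===== CLAIM (what is proved, stated in full; the proofs are below) =====
def Claim_equal_sort_programs_hierarchically_py : Prop := ∀ (programs : List (List (Option String))), Dom_sort_programs_hierarchically_py programs → Pre_sort_programs_hierarchically_py programs → Spec_sort_programs_hierarchically_py programs (sort_programs_hierarchically_py programs)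

-- ===== LEMMAS AND PROOFS =====

def pvDStep (d : PySem.Dict (Option String) (List (List (Option String)))) (program : List (Option String)) : PySem.Dict (Option String) (List (List (Option String))) :=
  if pvPid program == none then d
  else ((if d.contains (pvPid program) then d else d.insert (pvPid program) []).modify
          (pvPid program) [] (fun l => l ++ [program]))

def pvQ (k : Option String) (c : List (Option String)) : Bool :=
  !(pvPid c == none) && (pvPid c == k)

lemma pvDStep_getD (d : PySem.Dict (Option String) (List (List (Option String)))) (c : List (Option String)) (k : Option String) :
    (pvDStep d c).getD k [] = if pvQ k c then d.getD k [] ++ [c] else d.getD k [] := by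
  unfold pvDStep pvQ
  by_cases h : pvPid c = none
  · simp [h]
  · have hb : (pvPid c == none) = false := beq_eq_false_iff_ne.mpr h
    rw [if_neg (by simp [hb])]
    by_cases hk : k = pvPid c
    · subst hk
      by_cases hc : d.contains (pvPid c) = true
      · rw [if_pos hc, PySem.Dict.getD_modify, if_pos rfl, if_pos (by simp [hb])]
      · rw [if_neg hc, PySem.Dict.getD_modify, if_pos rfl, if_pos (by simp [hb]),
            PySem.Dict.getD_insert, if_pos rfl,
            PySem.Dict.getD_of_not_contains d [] (by simpa using hc)]
    · have hq : (!(pvPid c == none) && (pvPid c == k)) = false := by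
        have : (pvPid c == k) = false := by simp; exact fun h' => hk h'.symm
        simp [this]
      by_cases hc : d.contains (pvPid c) = true
      · rw [if_pos hc, PySem.Dict.getD_modify, if_neg hk,
            if_neg (show ¬_ = true by rw [hq]; exact Bool.false_ne_true)]
      · rw [if_neg hc, PySem.Dict.getD_modify, if_neg hk,
            if_neg (show ¬_ = true by rw [hq]; exact Bool.false_ne_true),
            PySem.Dict.getD_insert, if_neg hk]

lemma pvDStep_contains (d : PySem.Dict (Option String) (List (List (Option String)))) (c : List (Option String)) (k : Option String) :
    (pvDStep d c).contains k = (pvQ k c || d.contains k) := by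
  unfold pvDStep pvQ
  by_cases h : pvPid c = none
  · simp [h]
  · have hb : (pvPid c == none) = false := beq_eq_false_iff_ne.mpr h
    rw [if_neg (by simp [hb])]
    by_cases hc : d.contains (pvPid c) = true
    · rw [if_pos hc, PySem.Dict.contains_modify, hb]
      rw [BEq.comm]
      simp
    · rw [if_neg hc, PySem.Dict.contains_modify, PySem.Dict.contains_insert, hb]
      rw [BEq.comm]
      cases hkc : (pvPid c == k) <;> simp

lemma pvDFold_getD (l : List (List (Option String))) (d : PySem.Dict (Option String) (List (List (Option String)))) (k : Option String) :
    (l.foldl pvDStep d).getD k [] = d.getD k [] ++ l.filter (pvQ k) := by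
  induction l generalizing d with
  | nil => simp
  | cons c t ih =>
    rw [List.foldl_cons, ih, pvDStep_getD, List.filter_cons]
    by_cases hq : pvQ k c = true
    · rw [if_pos hq, if_pos hq, List.append_assoc]; rfl
    · rw [if_neg hq, if_neg hq]

lemma pvDFold_contains (l : List (List (Option String))) (d : PySem.Dict (Option String) (List (List (Option String)))) (k : Option String) :
    (l.foldl pvDStep d).contains k = (d.contains k || l.any (pvQ k)) := by
  induction l generalizing d with
  | nil => simp
  | cons c t ih =>
    rw [List.foldl_cons, ih, pvDStep_contains, List.any_cons]
    cases d.contains k <;> cases pvQ k c <;> simp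

lemma pvDFold_get? (l : List (List (Option String))) (k : Option String) :
    (l.foldl pvDStep PySem.Dict.empty).get? k
      = if l.filter (pvQ k) = [] then none else some (l.filter (pvQ k)) := by
  have hc : (l.foldl pvDStep PySem.Dict.empty).contains k = l.any (pvQ k) := by
    rw [pvDFold_contains]; simp
  by_cases hf : l.filter (pvQ k) = []
  · rw [if_pos hf]
    rw [PySem.Dict.get?_eq_none_iff_contains, hc]
    simpa [List.filter_eq_nil_iff, List.any_eq_false] using fun x hx => by
      have := List.filter_eq_nil_iff.mp hf x hx; simpa using this
  · rw [if_neg hf]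
    have hany : l.any (pvQ k) = true := by
      rcases List.exists_mem_of_ne_nil _ hf with ⟨x, hx⟩
      rcases List.mem_filter.mp hx with ⟨hxm, hxq⟩
      exact List.any_eq_true.mpr ⟨x, hxm, hxq⟩
    have hsome : ((l.foldl pvDStep PySem.Dict.empty).get? k).isSome := by
      rw [← PySem.Dict.contains_eq_isSome_get?, hc, hany]
    rcases Option.isSome_iff_exists.mp hsome with ⟨v, hv⟩
    have := PySem.Dict.getD_of_get?_eq_some (l.foldl pvDStep PySem.Dict.empty) [] hv
    rw [pvDFold_getD, PySem.Dict.getD_empty, List.nil_append] at this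
    rw [hv, this]

theorem pv_ports_eq (programs : List (List (Option String))) :
    sort_programs_hierarchically_py programs = sort_programs_hierarchically_py_alt programs := by
  simp only [sort_programs_hierarchically_py, sort_programs_hierarchically_py_alt]
  have hfold :
      (programs.foldl
        (fun (st : List (List (Option String)) × PySem.Dict (Option String) (List (List (Option String)))) program =>
          (if pvPid program == none then st.1 ++ [program] else st.1,
           if pvPid program == none then st.2
           else ((if st.2.contains (pvPid program) then st.2 else st.2.insert (pvPid program) []).modify
                   (pvPid program) [] (fun l => l ++ [program]))))
        ([], PySem.Dict.empty))
      = (programs.filter (fun p => pvPid p == none), programs.foldl pvDStep PySem.Dict.empty) := by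
    calc (programs.foldl _ ([], PySem.Dict.empty))
        = programs.foldl
            (fun (s : List (List (Option String)) × PySem.Dict (Option String) (List (List (Option String)))) e =>
              ((fun acc p => if pvPid p == none then acc ++ [p] else acc) s.1 e, pvDStep s.2 e))
            ([], PySem.Dict.empty) := rfl
      _ = (programs.filter (fun p => pvPid p == none), programs.foldl pvDStep PySem.Dict.empty) := by
            rw [PySem.List.foldl_prod_mk
                  (f := fun acc p => if pvPid p == none then acc ++ [p] else acc) (g := pvDStep),
                PySem.List.foldl_append_if_eq_filter, List.nil_append]
  rw [hfold]
  apply PySem.List.foldl_congr_mem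
  intro acc parent _
  show (match (programs.foldl pvDStep PySem.Dict.empty).get? (PySem.List.pyGetD parent 0 none) with
        | none => acc ++ [parent]
        | some children => acc ++ [parent] ++ PySem.List.sorted children pvKey false)
      = _
  rw [pvDFold_get? programs (PySem.List.pyGetD parent 0 none)]
  by_cases hf : programs.filter (pvQ (PySem.List.pyGetD parent 0 none)) = []
  · rw [if_pos hf]
    show acc ++ [parent] = acc ++ [parent] ++ _
    rw [show programs.filter (fun c => !(pvPid c == none) && (pvPid c == PySem.List.pyGetD parent 0 none)) = [] from hf,
        show PySem.List.sorted ([] : List (List (Option String))) pvKey false = [] by rw [PySem.List.sorted_eq_foldl_insertBy]; rfl,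
        List.append_nil]
  · rw [if_neg hf]
    show acc ++ [parent] ++ _ = acc ++ [parent] ++ _
    rfl

-- ===== VERDICT (by name: the statement is the Claim_ definition above) =====
theorem sort_programs_hierarchically_py_spec : Claim_equal_sort_programs_hierarchically_py := by
  intro programs _ _
  unfold Spec_sort_programs_hierarchically_py
  exact pv_ports_eq programs
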